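-- pv_equiv track=rewrite | github.com/Voldek404/High-school-of-programming | py_8tasks/8z_task2.py | digital_rain_helper
-- ===== SOURCE A (Python) =====
-- def digital_rain_helper(col: str, transformed_list: list, sum_dict: dict, summa: int, sub_col: list, index: int) -> str:
--     if index >= len(transformed_list):
--         if sub_col == []:
--             return ''
--         elif (("".join(sub_col)).count('1') == ("".join(sub_col)).count('0')):
--             return(sub_col[len(sub_col)-1])
--         else:
--             return (max(sub_col))
--     value = transformed_list[index]
--     summa += value
--     if summa in sum_dict:
--         start_index = sum_dict[summa] + 1
--         sub_col.append(col[start_index:index + 1])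
--     else:
--         sum_dict[summa] = index
--     return digital_rain_helper(col, transformed_list, sum_dict, summa, sub_col, index + 1)
-- ===== SOURCE B (Python) =====
-- def digital_rain_helper(col: str, transformed_list: list, sum_dict: dict, summa: int, sub_col: list, index: int) -> str:
--     # Iterative re-implementation: explicit loop over the remaining indices instead of
--     # tail recursion; mutates sum_dict and sub_col in place exactly like the original.
--     for i in range(index, len(transformed_list)):
--         summa += transformed_list[i]
--         if summa in sum_dict:
--             sub_col.append(col[sum_dict[summa] + 1:i + 1])
--         else:
--             sum_dict[summa] = i
--     if not sub_col:
--         return ''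
--     joined = "".join(sub_col)
--     if joined.count('1') == joined.count('0'):
--         return sub_col[len(sub_col) - 1]
--     return max(sub_col)
-- ===== Notes on version B (the rewrite author's own statement) =====
-- stated objective: idiomatic
-- what changed: Replaced the tail recursion (re-entering the function once per element with the state threaded through the arguments) by a single explicit for-loop over range(index, len(transformed_list)) that updates summa/sum_dict/sub_col in place, followed by the same final selection.
import Mathlib
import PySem

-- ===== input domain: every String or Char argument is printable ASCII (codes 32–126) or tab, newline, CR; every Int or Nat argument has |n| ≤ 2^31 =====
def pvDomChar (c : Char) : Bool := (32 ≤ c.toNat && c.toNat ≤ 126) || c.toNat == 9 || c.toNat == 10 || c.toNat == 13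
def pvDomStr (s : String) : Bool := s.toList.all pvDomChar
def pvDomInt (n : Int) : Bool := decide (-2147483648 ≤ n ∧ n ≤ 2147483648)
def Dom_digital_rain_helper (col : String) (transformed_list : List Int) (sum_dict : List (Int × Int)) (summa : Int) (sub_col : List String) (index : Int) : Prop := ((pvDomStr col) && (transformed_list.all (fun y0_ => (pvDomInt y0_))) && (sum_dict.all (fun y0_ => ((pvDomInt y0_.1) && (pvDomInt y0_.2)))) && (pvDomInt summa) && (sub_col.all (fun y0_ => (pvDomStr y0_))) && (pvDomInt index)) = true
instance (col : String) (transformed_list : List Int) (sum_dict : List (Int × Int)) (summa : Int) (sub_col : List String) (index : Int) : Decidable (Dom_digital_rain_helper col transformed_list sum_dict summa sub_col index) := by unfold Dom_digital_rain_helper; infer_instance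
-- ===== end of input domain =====

-- B replaces A's tail recursion by an explicit loop over the remaining indices (idiomatic,
-- constant stack); equivalence is about the RETURN value (both Pythons mutate sum_dict/sub_col
-- in place identically).

-- ===== PORT A =====
def digital_rain_helper (col : String) (transformed_list : List Int) (sum_dict : List (Int × Int)) (summa : Int) (sub_col : List String) (index : Int) : String :=
  if (transformed_list.length : Int) ≤ index then
    if sub_col = [] then ""
    else
      if PySem.Str.count (PySem.Str.join "" sub_col) "1" =
         PySem.Str.count (PySem.Str.join "" sub_col) "0" then
        ((PySem.List.pyGet? sub_col ((sub_col.length : Int) - 1)).getD "")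
      else (PySem.List.max? sub_col (fun y => y)).getD ""
  else
    match PySem.List.pyGet? transformed_list index with
    | none => ""   -- IndexError in Python; excluded by Pre_
    | some value =>
      let summa' := summa + value
      let d := PySem.Dict.mk sum_dict
      if d.contains summa' then
        let start_index := (d.get? summa').getD 0 + 1
        digital_rain_helper col transformed_list sum_dict summa'
          (sub_col ++ [PySem.Str.slice col (some start_index) (some (index + 1))]) (index + 1)
      else
        digital_rain_helper col transformed_list (d.insert summa' index).items summa'
          sub_col (index + 1)
termination_by ((transformed_list.length : Int) - index).toNat
decreasing_by all_goals omega

-- ===== PORT B =====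
def digital_rain_helper_alt (col : String) (transformed_list : List Int) (sum_dict : List (Int × Int)) (summa : Int) (sub_col : List String) (index : Int) : String :=
  let st := (PySem.List.pyRange index transformed_list.length 1).foldl
    (fun (st : List (Int × Int) × Int × List String) i =>
      let summa' := st.2.1 + (PySem.List.pyGet? transformed_list i).getD 0
      let d := PySem.Dict.mk st.1
      if d.contains summa' then
        (st.1, summa',
          st.2.2 ++ [PySem.Str.slice col (some ((d.get? summa').getD 0 + 1)) (some (i + 1))])
      else ((d.insert summa' i).items, summa', st.2.2))
    (sum_dict, summa, sub_col)
  if st.2.2 = [] then ""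
  else
    if PySem.Str.count (PySem.Str.join "" st.2.2) "1" =
       PySem.Str.count (PySem.Str.join "" st.2.2) "0" then
      ((PySem.List.pyGet? st.2.2 ((st.2.2.length : Int) - 1)).getD "")
    else (PySem.List.max? st.2.2 (fun y => y)).getD ""

-- ===== PRECONDITION & SPEC =====
-- Pre_ excludes exactly the inputs where Python A raises IndexError: an index below
-- -len(transformed_list) that is still < len(transformed_list).
def Pre_digital_rain_helper (col : String) (transformed_list : List Int) (sum_dict : List (Int × Int)) (summa : Int) (sub_col : List String) (index : Int) : Prop :=
  -(transformed_list.length : Int) ≤ index ∨ (transformed_list.length : Int) ≤ index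
instance (col : String) (transformed_list : List Int) (sum_dict : List (Int × Int)) (summa : Int) (sub_col : List String) (index : Int) : Decidable (Pre_digital_rain_helper col transformed_list sum_dict summa sub_col index) := by unfold Pre_digital_rain_helper; infer_instance

def pvWitness_digital_rain_helper : String × List Int × (List (Int × Int)) × Int × List String × Int :=
  ("0110", [1, -1, 1, -1], [], 0, [], 0)

def Spec_digital_rain_helper (col : String) (transformed_list : List Int) (sum_dict : List (Int × Int)) (summa : Int) (sub_col : List String) (index : Int) (out : String) : Prop := out = digital_rain_helper_alt col transformed_list sum_dict summa sub_col index
instance (col : String) (transformed_list : List Int) (sum_dict : List (Int × Int)) (summa : Int) (sub_col : List String) (index : Int) (out : String) : Decidable (Spec_digital_rain_helper col transformed_list sum_dict summa sub_col index out) := by unfold Spec_digital_rain_helper; infer_instance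

-- ===== CLAIM (what is proved, stated in full; the proofs are below) =====
def Claim_equal_digital_rain_helper : Prop := ∀ (col : String) (transformed_list : List Int) (sum_dict : List (Int × Int)) (summa : Int) (sub_col : List String) (index : Int), Dom_digital_rain_helper col transformed_list sum_dict summa sub_col index → Pre_digital_rain_helper col transformed_list sum_dict summa sub_col index → Spec_digital_rain_helper col transformed_list sum_dict summa sub_col index (digital_rain_helper col transformed_list sum_dict summa sub_col index)

-- ===== LEMMAS AND PROOFS =====

lemma pyGet?_isSome_of_bounds (tl : List Int) (i : Int)
    (h1 : -(tl.length : Int) ≤ i) (h2 : i < (tl.length : Int)) :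
    ∃ v, PySem.List.pyGet? tl i = some v := by
  cases h : PySem.List.pyGet? tl i with
  | some v => exact ⟨v, rfl⟩
  | none =>
    rw [PySem.List.pyGet?_eq_none_iff] at h
    exact absurd (by unfold PySem.Raise.InRange; omega) h

lemma drh_alt_step (col : String) (tl : List Int) (sd : List (Int × Int)) (summa : Int)
    (sc : List String) (index : Int) (h : index < (tl.length : Int)) :
    digital_rain_helper_alt col tl sd summa sc index =
      (let summa' := summa + (PySem.List.pyGet? tl index).getD 0
       let d := PySem.Dict.mk sd
       if d.contains summa' then
         digital_rain_helper_alt col tl sd summa'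
           (sc ++ [PySem.Str.slice col (some ((d.get? summa').getD 0 + 1)) (some (index + 1))])
           (index + 1)
       else digital_rain_helper_alt col tl (d.insert summa' index).items summa' sc (index + 1)) := by
  conv_lhs => unfold digital_rain_helper_alt
  rw [PySem.List.pyRange_one_cons h, List.foldl_cons]
  by_cases hc : (PySem.Dict.mk sd).contains (summa + (PySem.List.pyGet? tl index).getD 0)
  · rw [if_pos hc, if_pos hc]
    conv_rhs => unfold digital_rain_helper_alt
  · rw [if_neg hc, if_neg hc]
    conv_rhs => unfold digital_rain_helper_alt

lemma drh_main (col : String) (tl : List Int) :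
    ∀ (n : ℕ) (sd : List (Int × Int)) (summa : Int) (sc : List String) (index : Int),
      ((tl.length : Int) - index).toNat = n →
      -(tl.length : Int) ≤ index →
      digital_rain_helper col tl sd summa sc index =
        digital_rain_helper_alt col tl sd summa sc index := by
  intro n
  induction n with
  | zero =>
    intro sd summa sc index h0 hge
    have hle : (tl.length : Int) ≤ index := by omega
    rw [digital_rain_helper]
    unfold digital_rain_helper_alt
    rw [if_pos hle, PySem.List.pyRange_one_eq_nil hle, List.foldl_nil]
  | succ n ih =>
    intro sd summa sc index h0 hge
    have hlt : index < (tl.length : Int) := by omega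
    obtain ⟨v, hv⟩ := pyGet?_isSome_of_bounds tl index hge hlt
    rw [digital_rain_helper]
    rw [if_neg (by omega), hv]
    rw [drh_alt_step col tl sd summa sc index hlt, hv]
    simp only [Option.getD_some]
    by_cases hc : (PySem.Dict.mk sd).contains (summa + v)
    · rw [if_pos hc, if_pos hc]
      exact ih sd (summa + v) _ (index + 1) (by omega) (by omega)
    · rw [if_neg hc, if_neg hc]
      exact ih _ (summa + v) sc (index + 1) (by omega) (by omega)

-- ===== VERDICT (by name: the statement is the Claim_ definition above) =====
theorem digital_rain_helper_spec : Claim_equal_digital_rain_helper := by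
  intro col tl sd summa sc index _ hpre
  unfold Spec_digital_rain_helper
  rcases hpre with h | h
  · exact drh_main col tl _ sd summa sc index rfl h
  · exact drh_main col tl _ sd summa sc index rfl (by omega)
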